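-- pv_equiv track=rewrite | github.com/UNSW-database/simd_set_operations | scripts/results/label.py | algorithm_label
-- ===== SOURCE A (Python) =====
-- SCALAR_ALGORITHMS = {
--     "naive_merge": "Merge (branch)",
--     "branchless_merge": "Merge (branchless)",
-- }
--
-- VECTOR_ALGORITHMS = {
--     "qfilter": "QFilter",
--     "qfilter_c": "QFilter(FFI)",
--     "bmiss": "BMiss",
--     "bmiss_sttni": "BMissSTTNI",
--     "shuffling_sse": "Shuffle128",
--     "shuffling_avx2": "Shuffle256",
--     "shuffling_avx512": "Shuffle512",
--     "broadcast_sse": "Bcast128",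
--     "broadcast_avx2": "Bcast256",
--     "broadcast_avx512": "Bcast512",
--     "vp2intersect_emulation": "VP2Emul",
--     "croaring": "Roaring",
--     # TODO
--     "lbk_v3_sse": "LBK v3 128",
--     "lbk_v3_avx2": "LBK v3 256",
--     "lbk_v3_avx512": "LBK v3 512",
--     "lbk_v1x4_sse": "LBK v1 x4 128",
--     "lbk_v1x8_sse": "LBK v1 x8 128",
--     "lbk_v1x8_avx2": "LBK v1 x8 256",
--     "lbk_v1x16_avx2": "LBK v1 x16 256",
--     "lbk_v1x16_avx512": "LBK v1 x16 512",
--     "lbk_v1x32_avx512": "LBK v1 x32 512",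
--     "galloping": "Galloping",
--     "galloping_sse": "Gallop128",
--     "galloping_avx2": "Gallop256",
--     "galloping_avx512": "Gallop512",
-- }
--
-- SAVE_TYPE = {
--     "_count": "COUNT",
--     "_lut": "LUT",
--     "_comp": "COMP",
-- }
--
-- NO_SAVE = [
--     "merge",
--     "bmiss",
--     "galloping",
--     "lbk",
--     "croaring",
-- ]
--
-- NO_BRANCH = [
--     "merge",
--     "galloping",
--     "lbk",
--     "croaring",
-- ]
--
-- def algorithm_label(alg, label="", has_branch=False):
--
--     scalar = SCALAR_ALGORITHMS.get(alg)
--     if scalar is not None: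
--         return scalar + label
--
--     vector = VECTOR_ALGORITHMS.get(alg)
--     if vector is not None:
--         if not has_branch and not any(x in alg for x in NO_BRANCH):
--             label = " (!BR)" + label
--         return vector + label
--
--     for postfix, tag in SAVE_TYPE.items():
--         if alg.endswith(postfix):
--             rest = alg[:-len(postfix)]
--             tagged = f" ({tag})" + label if not any(x in alg for x in NO_SAVE) else label
--             return algorithm_label(rest, tagged, has_branch)
--
--     if alg.endswith("_br"):
--         return algorithm_label(alg[:-3], " (BR)" + label, True)
--
--     if alg.endswith("_bsr"):
--         if not has_branch and not any(x in alg for x in NO_BRANCH):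
--             label = " (branchless)" + label
--         return algorithm_label(alg[:-4], " BSR" + label, True)
--
--     return f"FAIL: {alg}{label}"
-- ===== SOURCE B (Python) =====
-- SCALAR_ALGORITHMS = {
--     "naive_merge": "Merge (branch)",
--     "branchless_merge": "Merge (branchless)",
-- }
--
-- VECTOR_ALGORITHMS = {
--     "qfilter": "QFilter",
--     "qfilter_c": "QFilter(FFI)",
--     "bmiss": "BMiss",
--     "bmiss_sttni": "BMissSTTNI",
--     "shuffling_sse": "Shuffle128",
--     "shuffling_avx2": "Shuffle256",
--     "shuffling_avx512": "Shuffle512",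
--     "broadcast_sse": "Bcast128",
--     "broadcast_avx2": "Bcast256",
--     "broadcast_avx512": "Bcast512",
--     "vp2intersect_emulation": "VP2Emul",
--     "croaring": "Roaring",
--     "lbk_v3_sse": "LBK v3 128",
--     "lbk_v3_avx2": "LBK v3 256",
--     "lbk_v3_avx512": "LBK v3 512",
--     "lbk_v1x4_sse": "LBK v1 x4 128",
--     "lbk_v1x8_sse": "LBK v1 x8 128",
--     "lbk_v1x8_avx2": "LBK v1 x8 256",
--     "lbk_v1x16_avx2": "LBK v1 x16 256",
--     "lbk_v1x16_avx512": "LBK v1 x16 512",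
--     "lbk_v1x32_avx512": "LBK v1 x32 512",
--     "galloping": "Galloping",
--     "galloping_sse": "Gallop128",
--     "galloping_avx2": "Gallop256",
--     "galloping_avx512": "Gallop512",
-- }
--
-- SAVE_TYPE = {
--     "_count": "COUNT",
--     "_lut": "LUT",
--     "_comp": "COMP",
-- }
--
-- NO_SAVE = ["merge", "bmiss", "galloping", "lbk", "croaring"]
--
-- NO_BRANCH = ["merge", "galloping", "lbk", "croaring"]
--
--
-- def algorithm_label(alg, label="", has_branch=False):
--     # Two phases: (1) strip suffixes from `alg`, collecting the generated tag
--     # pieces in a list; (2) assemble the result from the base name, the joined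
--     # reversed pieces and the original label.  No recursion, no label threading.
--     tags = []
--     failed = False
--     while alg not in SCALAR_ALGORITHMS and alg not in VECTOR_ALGORITHMS:
--         for postfix, tag in SAVE_TYPE.items():
--             if alg.endswith(postfix):
--                 if not any(x in alg for x in NO_SAVE):
--                     tags.append(" (%s)" % tag)
--                 alg = alg[:-len(postfix)]
--                 break
--         else:
--             if alg.endswith("_br"):
--                 tags.append(" (BR)")
--                 alg = alg[:-3]
--                 has_branch = True
--             elif alg.endswith("_bsr"):
--                 piece = " BSR (branchless)" if not has_branch and not any(
--                     x in alg for x in NO_BRANCH) else " BSR"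
--                 tags.append(piece)
--                 alg = alg[:-4]
--                 has_branch = True
--             else:
--                 failed = True
--                 break
--     suffix = "".join(reversed(tags)) + label
--     if failed:
--         return "FAIL: " + alg + suffix
--     scalar = SCALAR_ALGORITHMS.get(alg)
--     if scalar is not None:
--         return scalar + suffix
--     head = VECTOR_ALGORITHMS.get(alg, "")
--     if not has_branch and not any(x in alg for x in NO_BRANCH):
--         head += " (!BR)"
--     return head + suffix
-- ===== Notes on version B (the rewrite author's own statement) =====
-- stated objective: alternative
-- what changed: Replaces A's tail recursion that threads the growing label through every call by a two-phase algorithm: a loop that strips suffixes while collecting the generated tag pieces in a list, then a separate assembly step that joins the reversed pieces between the base name and the original label.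
import Mathlib
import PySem

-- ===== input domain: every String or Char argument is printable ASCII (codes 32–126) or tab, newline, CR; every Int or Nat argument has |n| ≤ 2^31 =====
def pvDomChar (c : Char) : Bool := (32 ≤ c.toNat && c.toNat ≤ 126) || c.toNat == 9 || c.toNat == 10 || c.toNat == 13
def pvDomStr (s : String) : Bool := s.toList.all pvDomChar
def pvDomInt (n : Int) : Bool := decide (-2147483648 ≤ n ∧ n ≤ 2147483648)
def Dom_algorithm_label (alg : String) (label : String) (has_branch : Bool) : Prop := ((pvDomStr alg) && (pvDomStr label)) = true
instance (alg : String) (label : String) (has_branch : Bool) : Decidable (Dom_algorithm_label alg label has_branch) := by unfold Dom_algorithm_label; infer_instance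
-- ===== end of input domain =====

-- B replaces A's tail recursion by two phases: a stripping loop that collects the tag
-- pieces in a list, then a separate assembly step (objective: alternative decomposition).

set_option maxHeartbeats 1000000

-- ===== PORT A =====
def pvSCALAR : PySem.Dict String String := PySem.Dict.ofList
  [("naive_merge", "Merge (branch)"), ("branchless_merge", "Merge (branchless)")]

def pvVECTOR : PySem.Dict String String := PySem.Dict.ofList
  [("qfilter", "QFilter"), ("qfilter_c", "QFilter(FFI)"), ("bmiss", "BMiss"),
   ("bmiss_sttni", "BMissSTTNI"), ("shuffling_sse", "Shuffle128"),
   ("shuffling_avx2", "Shuffle256"), ("shuffling_avx512", "Shuffle512"),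
   ("broadcast_sse", "Bcast128"), ("broadcast_avx2", "Bcast256"),
   ("broadcast_avx512", "Bcast512"), ("vp2intersect_emulation", "VP2Emul"),
   ("croaring", "Roaring"), ("lbk_v3_sse", "LBK v3 128"), ("lbk_v3_avx2", "LBK v3 256"),
   ("lbk_v3_avx512", "LBK v3 512"), ("lbk_v1x4_sse", "LBK v1 x4 128"),
   ("lbk_v1x8_sse", "LBK v1 x8 128"), ("lbk_v1x8_avx2", "LBK v1 x8 256"),
   ("lbk_v1x16_avx2", "LBK v1 x16 256"), ("lbk_v1x16_avx512", "LBK v1 x16 512"),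
   ("lbk_v1x32_avx512", "LBK v1 x32 512"), ("galloping", "Galloping"),
   ("galloping_sse", "Gallop128"), ("galloping_avx2", "Gallop256"),
   ("galloping_avx512", "Gallop512")]

def pvSAVE : List (String × String) := [("_count", "COUNT"), ("_lut", "LUT"), ("_comp", "COMP")]

def pvNO_SAVE : List String := ["merge", "bmiss", "galloping", "lbk", "croaring"]

def pvNO_BRANCH : List String := ["merge", "galloping", "lbk", "croaring"]

-- termination fact used by both ports: stripping a matched non-empty suffix shortens alg
theorem pv_len_slice_lt (alg p : String) (k : Nat) (hk : 0 < k)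
    (hlen : p.toList.length = k) (h : PySem.Str.endswith alg p = true) :
    (PySem.Str.slice alg none (some (-(k : Int)))).toList.length < alg.toList.length := by
  have hsuf : p.toList <:+ alg.toList := by
    rw [PySem.Str.endswith_eq, PySem.Chars.endswith_iff] at h; exact h
  have hle : k ≤ alg.toList.length := hlen ▸ hsuf.length_le
  have h0 : 0 < alg.toList.length := lt_of_lt_of_le hk hle
  rw [PySem.Str.toList_slice, PySem.Chars.slice_eq_listSlice,
    PySem.List.slice_to_neg_natCast _ k hk, List.length_take]
  omega

def algorithm_label (alg : String) (label : String) (has_branch : Bool) : String :=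
  match PySem.Dict.get? pvSCALAR alg with
  | some scalar => scalar ++ label
  | none =>
    match PySem.Dict.get? pvVECTOR alg with
    | some vector =>
      let label := if !has_branch && !(pvNO_BRANCH.any fun x => PySem.Str.isIn x alg)
        then " (!BR)" ++ label else label
      vector ++ label
    | none =>
      match hfind : pvSAVE.find? (fun p => PySem.Str.endswith alg p.1) with
      | some (pfix, tag) =>
        let rest := PySem.Str.slice alg none (some (-(PySem.Str.len pfix)))
        let tagged := if !(pvNO_SAVE.any fun x => PySem.Str.isIn x alg)
          then " (" ++ tag ++ ")" ++ label else label
        algorithm_label rest tagged has_branch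
      | none =>
        if hbr : PySem.Str.endswith alg "_br" = true then
          algorithm_label (PySem.Str.slice alg none (some (-3))) (" (BR)" ++ label) true
        else if hbsr : PySem.Str.endswith alg "_bsr" = true then
          let label := if !has_branch && !(pvNO_BRANCH.any fun x => PySem.Str.isIn x alg)
            then " (branchless)" ++ label else label
          algorithm_label (PySem.Str.slice alg none (some (-4))) (" BSR" ++ label) true
        else "FAIL: " ++ alg ++ label
termination_by alg.toList.length
decreasing_by
  · have hmem := List.mem_of_find?_eq_some hfind
    have hmatch := List.find?_some hfind
    simp only [pvSAVE, List.mem_cons, List.not_mem_nil, or_false, Prod.mk.injEq] at hmem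
    rcases hmem with ⟨rfl, rfl⟩ | ⟨rfl, rfl⟩ | ⟨rfl, rfl⟩
    · exact pv_len_slice_lt alg "_count" 6 (by omega) (by decide) hmatch
    · exact pv_len_slice_lt alg "_lut" 4 (by omega) (by decide) hmatch
    · exact pv_len_slice_lt alg "_comp" 5 (by omega) (by decide) hmatch
  · exact pv_len_slice_lt alg "_br" 3 (by omega) (by decide) hbr
  · exact pv_len_slice_lt alg "_bsr" 4 (by omega) (by decide) hbsr

-- ===== PORT B =====
-- phase 1 of Source B: the while loop; state = (alg, tags, has_branch, failed)
def pvStrip (alg : String) (tags : List String) (has_branch : Bool) :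
    String × List String × Bool × Bool :=
  if (PySem.Dict.get? pvSCALAR alg).isNone && (PySem.Dict.get? pvVECTOR alg).isNone then
    match hfind : pvSAVE.find? (fun p => PySem.Str.endswith alg p.1) with
    | some (pfix, tag) =>
      let tags := if !(pvNO_SAVE.any fun x => PySem.Str.isIn x alg)
        then tags ++ [" (" ++ tag ++ ")"] else tags
      pvStrip (PySem.Str.slice alg none (some (-(PySem.Str.len pfix)))) tags has_branch
    | none =>
      if hbr : PySem.Str.endswith alg "_br" = true then
        pvStrip (PySem.Str.slice alg none (some (-3))) (tags ++ [" (BR)"]) true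
      else if hbsr : PySem.Str.endswith alg "_bsr" = true then
        let piece := if !has_branch && !(pvNO_BRANCH.any fun x => PySem.Str.isIn x alg)
          then " BSR (branchless)" else " BSR"
        pvStrip (PySem.Str.slice alg none (some (-4))) (tags ++ [piece]) true
      else (alg, tags, has_branch, true)
  else (alg, tags, has_branch, false)
termination_by alg.toList.length
decreasing_by
  · have hmem := List.mem_of_find?_eq_some hfind
    have hmatch := List.find?_some hfind
    simp only [pvSAVE, List.mem_cons, List.not_mem_nil, or_false, Prod.mk.injEq] at hmem
    rcases hmem with ⟨rfl, rfl⟩ | ⟨rfl, rfl⟩ | ⟨rfl, rfl⟩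
    · exact pv_len_slice_lt alg "_count" 6 (by omega) (by decide) hmatch
    · exact pv_len_slice_lt alg "_lut" 4 (by omega) (by decide) hmatch
    · exact pv_len_slice_lt alg "_comp" 5 (by omega) (by decide) hmatch
  · exact pv_len_slice_lt alg "_br" 3 (by omega) (by decide) hbr
  · exact pv_len_slice_lt alg "_bsr" 4 (by omega) (by decide) hbsr

-- "".join(reversed(tags))
def pvJoinRev (tags : List String) : String := tags.reverse.foldl (· ++ ·) ""

-- phase 2 of Source B: assemble the answer from the final loop state and the label
def pvFinish (st : String × List String × Bool × Bool) (label : String) : String :=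
  let (alg, tags, has_branch, failed) := st
  let suffix := pvJoinRev tags ++ label
  if failed then "FAIL: " ++ alg ++ suffix
  else
    match PySem.Dict.get? pvSCALAR alg with
    | some scalar => scalar ++ suffix
    | none =>
      let head := (PySem.Dict.get? pvVECTOR alg).getD ""
      let head := if !has_branch && !(pvNO_BRANCH.any fun x => PySem.Str.isIn x alg)
        then head ++ " (!BR)" else head
      head ++ suffix

def algorithm_label_alt (alg : String) (label : String) (has_branch : Bool) : String :=
  pvFinish (pvStrip alg [] has_branch) label

-- ===== PRECONDITION & SPEC =====
def Spec_algorithm_label (alg : String) (label : String) (has_branch : Bool) (out : String) : Prop := out = algorithm_label_alt alg label has_branch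
instance (alg : String) (label : String) (has_branch : Bool) (out : String) : Decidable (Spec_algorithm_label alg label has_branch out) := by unfold Spec_algorithm_label; infer_instance

-- ===== CLAIM (what is proved, stated in full; the proofs are below) =====
def Claim_equal_algorithm_label : Prop := ∀ (alg : String) (label : String) (has_branch : Bool), Dom_algorithm_label alg label has_branch → Spec_algorithm_label alg label has_branch (algorithm_label alg label has_branch)

-- ===== LEMMAS AND PROOFS =====

theorem pv_foldl_append (l : List String) (a : String) :
    l.foldl (· ++ ·) a = a ++ l.foldl (· ++ ·) "" := by
  induction l generalizing a with
  | nil => simp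
  | cons x xs ih =>
    simp only [List.foldl_cons]
    rw [ih (a ++ x), ih ("" ++ x)]
    simp [String.append_assoc]

theorem pvJoinRev_snoc (tags : List String) (p : String) :
    pvJoinRev (tags ++ [p]) = p ++ pvJoinRev tags := by
  unfold pvJoinRev
  rw [List.reverse_append, List.reverse_singleton, List.singleton_append,
    List.foldl_cons]
  simpa using pv_foldl_append tags.reverse p

-- main invariant: assembling the stripped state equals A with the collected tags prepended
theorem pv_main (n : Nat) (alg : String) (hn : alg.toList.length = n)
    (tags : List String) (has_branch : Bool) (label : String) :
    pvFinish (pvStrip alg tags has_branch) label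
      = algorithm_label alg (pvJoinRev tags ++ label) has_branch := by
  induction n using Nat.strong_induction_on generalizing alg tags has_branch label with
  | _ n ih =>
    rw [pvStrip, algorithm_label]
    cases hS : PySem.Dict.get? pvSCALAR alg with
    | some scalar =>
      rw [if_neg (by simp)]
      simp [pvFinish, hS]
    | none =>
      cases hV : PySem.Dict.get? pvVECTOR alg with
      | some vector =>
        rw [if_neg (by simp)]
        simp only [pvFinish, hS, hV, Option.getD_some, Bool.false_eq_true, if_false]
        split_ifs <;> simp [String.append_assoc]
      | none =>
        rw [if_pos (by simp)]
        cases hF : pvSAVE.find? (fun p => PySem.Str.endswith alg p.1) with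
        | some pt =>
          obtain ⟨pfix, tag⟩ := pt
          simp only []
          have hmem := List.mem_of_find?_eq_some hF
          have hmatch := List.find?_some hF
          have hlt : (PySem.Str.slice alg none (some (-(PySem.Str.len pfix)))).toList.length < n := by
            simp only [pvSAVE, List.mem_cons, List.not_mem_nil, or_false, Prod.mk.injEq] at hmem
            subst hn
            rcases hmem with ⟨rfl, rfl⟩ | ⟨rfl, rfl⟩ | ⟨rfl, rfl⟩
            · exact pv_len_slice_lt alg "_count" 6 (by omega) (by decide) hmatch
            · exact pv_len_slice_lt alg "_lut" 4 (by omega) (by decide) hmatch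
            · exact pv_len_slice_lt alg "_comp" 5 (by omega) (by decide) hmatch
          rw [ih _ hlt _ rfl]
          split_ifs <;> simp [pvJoinRev_snoc, String.append_assoc]
        | none =>
          simp only []
          split_ifs with hbr hbsr hc
          · have hlt : (PySem.Str.slice alg none (some (-3))).toList.length < n := by
              subst hn; exact pv_len_slice_lt alg "_br" 3 (by omega) (by decide) hbr
            rw [ih _ hlt _ rfl, pvJoinRev_snoc]
            simp [String.append_assoc]
          · have hlt : (PySem.Str.slice alg none (some (-4))).toList.length < n := by
              subst hn; exact pv_len_slice_lt alg "_bsr" 4 (by omega) (by decide) hbsr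
            rw [ih _ hlt _ rfl, pvJoinRev_snoc,
              show (" BSR (branchless)" : String) = " BSR" ++ " (branchless)" from rfl]
            simp only [String.append_assoc]
          · have hlt : (PySem.Str.slice alg none (some (-4))).toList.length < n := by
              subst hn; exact pv_len_slice_lt alg "_bsr" 4 (by omega) (by decide) hbsr
            rw [ih _ hlt _ rfl, pvJoinRev_snoc]
            simp [String.append_assoc]
          · simp [pvFinish, String.append_assoc]

-- ===== VERDICT (by name: the statement is the Claim_ definition above) =====
theorem algorithm_label_spec : Claim_equal_algorithm_label := by
  intro alg label has_branch _
  unfold Spec_algorithm_label algorithm_label_alt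
  rw [pv_main alg.toList.length alg rfl [] has_branch label]
  simp [pvJoinRev]
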